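-- pv_equiv track=rewrite | github.com/00000SZ/whitetrash | django_site/whitetrash/wtdomains.py | domain_chunk_reverse
-- ===== SOURCE A (Python) =====
-- def domain_chunk_reverse(domain):
--     """Generator that outputs cumulative labels of a domain starting
--     from the rightmost label."""
--
--     spdom = domain.rsplit(".")
--     output = ""
--     try:
--         while(1):
--             chunk = spdom.pop()
--             if not output:
--                 output = chunk
--             else:
--                 output = ".".join((chunk,output))
--             yield output
--     except IndexError:
--         pass
-- ===== SOURCE B (Python) =====
-- def domain_chunk_reverse(domain):
--     """Yield the cumulative suffixes of a domain, rightmost label first: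
--     'a.b.c' -> 'c', 'b.c', 'a.b.c'."""
--     parts = domain.rsplit(".")
--     for i in range(len(parts) - 1, -1, -1):
--         yield ".".join(parts[i:])
-- ===== Notes on version B (the rewrite author's own statement) =====
-- stated objective: simpler
-- what changed: B replaces A's exception-terminated while loop that pops labels and threads a growing accumulator (with a falsy-string check) by a single bounded descending for-loop that recomputes each cumulative suffix directly as a slice-join.
-- intended difference: On domains ending with '.', A's falsy-output check silently drops the trailing dot (and collapses trailing empty labels) from every yielded suffix, e.g. 'a.' gives ['', 'a']; B yields the true suffixes ['', 'a.'], which is the intended cumulative-suffix behaviour. — e.g. on domain_chunk_reverse("a."): A returns ["", "a"], B returns ["", "a."]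
import Mathlib
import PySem

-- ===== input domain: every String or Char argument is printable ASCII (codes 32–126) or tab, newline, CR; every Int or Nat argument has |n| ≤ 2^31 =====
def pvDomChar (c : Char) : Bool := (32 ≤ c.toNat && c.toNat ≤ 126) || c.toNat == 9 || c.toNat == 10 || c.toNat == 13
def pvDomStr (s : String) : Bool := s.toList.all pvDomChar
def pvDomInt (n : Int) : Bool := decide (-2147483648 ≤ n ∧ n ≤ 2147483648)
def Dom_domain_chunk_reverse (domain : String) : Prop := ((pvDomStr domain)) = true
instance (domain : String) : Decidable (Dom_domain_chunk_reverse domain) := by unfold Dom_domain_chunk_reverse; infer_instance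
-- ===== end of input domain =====

-- B replaces A's exception-terminated pop/accumulator loop by a bounded descending
-- for-loop emitting each cumulative suffix as a direct slice-join (same cost, simpler).
-- The Python functions are generators; each port returns the list of yielded values.
-- On domains ending with '.' the two differ (stated in D_ below).

-- ===== PORT A =====
-- the while(1)/pop()/IndexError loop: pop() takes from the right, so the port
-- recurses over the reversed label list, threading A's `output` accumulator
def pvALoop : List (List Char) → List Char → List (List Char)
  | [], _ => []
  | chunk :: rest, output =>
      -- if not output: output = chunk  else: output = ".".join((chunk, output))
      let out := if output = [] then chunk else PySem.Chars.join ['.'] [chunk, output]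
      out :: pvALoop rest out

def domain_chunk_reverse (domain : String) : List String :=
  -- domain.rsplit(".") with no maxsplit is exactly domain.split(".")
  let spdom := PySem.Chars.splitOn domain.toList ['.']
  (pvALoop spdom.reverse []).map String.ofList

-- ===== PORT B =====
-- for i in range(len(parts) - 1, -1, -1): yield ".".join(parts[i:])
-- (descending range as descending recursion; argument i+1 means the loop is at index i)
def pvBGo (parts : List (List Char)) : Nat → List (List Char)
  | 0 => []
  | i + 1 => PySem.Chars.join ['.'] (PySem.List.slice parts (some (i : Int))) :: pvBGo parts i

def domain_chunk_reverse_alt (domain : String) : List String :=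
  let parts := PySem.Chars.splitOn domain.toList ['.']
  (pvBGo parts parts.length).map String.ofList

-- ===== PRECONDITION & SPEC =====
-- On domains ending with '.', A's falsy-output check silently drops the trailing dot
-- (and collapses trailing empty labels) from every yielded suffix; B yields the true
-- cumulative suffixes, which is the intended behaviour.
def D_domain_chunk_reverse (domain : String) : Prop := domain.toList.getLast? = some '.'
instance (domain : String) : Decidable (D_domain_chunk_reverse domain) := by
  unfold D_domain_chunk_reverse; infer_instance

def Spec_domain_chunk_reverse (domain : String) (out : List String) : Prop :=
  ¬ D_domain_chunk_reverse domain → out = domain_chunk_reverse_alt domain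
instance (domain : String) (out : List String) : Decidable (Spec_domain_chunk_reverse domain out) := by
  unfold Spec_domain_chunk_reverse; infer_instance

def pvDiffWitness_domain_chunk_reverse : String := "a."
def pvDiffWitnessOut_domain_chunk_reverse : (List String) × (List String) :=
  (["", "a"], ["", "a."])

-- ===== CLAIM (what is proved, stated in full; the proofs are below) =====
def Claim_unchanged_domain_chunk_reverse : Prop := ∀ (domain : String), Dom_domain_chunk_reverse domain → Spec_domain_chunk_reverse domain (domain_chunk_reverse domain)
def Claim_changed_domain_chunk_reverse : Prop := Dom_domain_chunk_reverse (pvDiffWitness_domain_chunk_reverse) ∧ D_domain_chunk_reverse (pvDiffWitness_domain_chunk_reverse) ∧ domain_chunk_reverse (pvDiffWitness_domain_chunk_reverse) = pvDiffWitnessOut_domain_chunk_reverse.1 ∧ domain_chunk_reverse_alt (pvDiffWitness_domain_chunk_reverse) = pvDiffWitnessOut_domain_chunk_reverse.2 ∧ pvDiffWitnessOut_domain_chunk_reverse.1 ≠ pvDiffWitnessOut_domain_chunk_reverse.2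
def Claim_exact_domain_chunk_reverse : Prop := ∀ (domain : String), Dom_domain_chunk_reverse domain → D_domain_chunk_reverse domain → domain_chunk_reverse domain ≠ domain_chunk_reverse_alt domain

-- ===== LEMMAS AND PROOFS =====

-- a simple structural model of splitting on '.' (left to right)
def pvSplit : List Char → List (List Char)
  | [] => [[]]
  | c :: rest =>
      if c = '.' then [] :: pvSplit rest
      else match pvSplit rest with
        | [] => [[c]]
        | h :: t => (c :: h) :: t

lemma pvSplit_cons (c : Char) (rest : List Char) :
    pvSplit (c :: rest) = if c = '.' then [] :: pvSplit rest
      else match pvSplit rest with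
        | [] => [[c]]
        | h :: t => (c :: h) :: t := rfl

lemma pvSplit_ne_nil : ∀ s, pvSplit s ≠ [] := by
  intro s
  cases s with
  | nil => simp [pvSplit]
  | cons c rest =>
      simp only [pvSplit]
      split
      · simp
      · split <;> simp

def pvWithHead (p : List Char) : List (List Char) → List (List Char)
  | [] => [p]
  | h :: t => (p ++ h) :: t

lemma pvGo_eq : ∀ fuel (l cur : List Char) (acc : List (List Char)), l.length < fuel →
    PySem.Chars.splitOn.go ['.'] fuel l cur acc =
      acc.reverse ++ pvWithHead cur.reverse (pvSplit l) := by
  intro fuel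
  induction fuel with
  | zero => intro l cur acc h; omega
  | succ f ih =>
      intro l cur acc h
      cases l with
      | nil =>
          simp [PySem.Chars.splitOn.go, pvSplit, pvWithHead]
      | cons c rest =>
          by_cases hc : c = '.'
          · subst hc
            have hp : List.isPrefixOf ['.'] ('.' :: rest) = true := by
              simp [List.isPrefixOf]
            rw [PySem.Chars.splitOn.go]
            simp only [hp, if_true]
            have : List.drop (['.'] : List Char).length ('.' :: rest) = rest := by simp
            rw [this, ih rest [] (cur.reverse :: acc) (by simpa using Nat.lt_of_succ_lt_succ h)]
            simp only [pvSplit, if_true]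
            cases hps : pvSplit rest with
            | nil => exact absurd hps (pvSplit_ne_nil rest)
            | cons h' t' => simp [pvWithHead]
          · have hp : List.isPrefixOf ['.'] (c :: rest) = false := by
              simp only [List.isPrefixOf]
              simp [Ne.symm hc]
            rw [PySem.Chars.splitOn.go]
            simp only [hp]
            rw [ih rest (c :: cur) acc (by simpa using Nat.lt_of_succ_lt_succ h)]
            simp only [pvSplit, if_neg hc]
            cases hps : pvSplit rest with
            | nil => exact absurd hps (pvSplit_ne_nil rest)
            | cons h' t' => simp [pvWithHead]

lemma pvSplitOn_eq (s : List Char) : PySem.Chars.splitOn s ['.'] = pvSplit s := by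
  rw [PySem.Chars.splitOn, pvGo_eq (s.length + 1) s [] [] (by omega)]
  cases hps : pvSplit s with
  | nil => exact absurd hps (pvSplit_ne_nil s)
  | cons h t => simp [pvWithHead]

-- if s does not end with '.', the last split part is nonempty
lemma pvSplit_last_ne : ∀ s : List Char, s ≠ [] → s.getLast? ≠ some '.' →
    ∃ q c, pvSplit s = q ++ [c] ∧ c ≠ [] := by
  intro s
  induction s with
  | nil => intro h; exact absurd rfl h
  | cons a rest ih =>
      intro _ hlast
      cases rest with
      | nil =>
          have ha : a ≠ '.' := by simpa [List.getLast?] using hlast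
          exact ⟨[], [a], by rw [pvSplit_cons, if_neg ha]; rfl, by simp⟩
      | cons b r =>
          have hlast' : (b :: r).getLast? ≠ some '.' := by
            simpa [List.getLast?_cons_cons] using hlast
          obtain ⟨q, c, hq, hc⟩ := ih (by simp) hlast'
          by_cases ha : a = '.'
          · exact ⟨[] :: q, c, by rw [pvSplit_cons, if_pos ha, hq]; rfl, hc⟩
          · cases q with
            | nil =>
                exact ⟨[], a :: c, by rw [pvSplit_cons, if_neg ha, hq]; rfl, by simp⟩
            | cons h t =>
                exact ⟨(a :: h) :: t, c, by rw [pvSplit_cons, if_neg ha, hq]; rfl, hc⟩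

-- if s ends with '.', the split is a nonempty prefix followed by an empty part
lemma pvSplit_last_dot : ∀ s : List Char, s.getLast? = some '.' →
    ∃ q, pvSplit s = q ++ [[]] ∧ q ≠ [] := by
  intro s
  induction s with
  | nil => intro h; simp at h
  | cons a rest ih =>
      intro hlast
      cases rest with
      | nil =>
          have ha : a = '.' := by simpa [List.getLast?] using hlast
          exact ⟨[[]], by rw [pvSplit_cons, if_pos ha]; rfl, by simp⟩
      | cons b r =>
          have hlast' : (b :: r).getLast? = some '.' := by
            simpa [List.getLast?_cons_cons] using hlast
          obtain ⟨q, hq, hqne⟩ := ih hlast'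
          by_cases ha : a = '.'
          · exact ⟨[] :: q, by rw [pvSplit_cons, if_pos ha, hq]; rfl, by simp⟩
          · cases q with
            | nil => exact absurd rfl hqne
            | cons h t =>
                exact ⟨(a :: h) :: t, by rw [pvSplit_cons, if_neg ha, hq]; rfl, by simp⟩

lemma pvJoin_pair (c : List Char) (tail : List (List Char)) (h : tail ≠ []) :
    PySem.Chars.join ['.'] [c, PySem.Chars.join ['.'] tail] =
      PySem.Chars.join ['.'] (c :: tail) := by
  cases tail with
  | nil => exact absurd rfl h
  | cons d t =>
      rw [PySem.Chars.join_cons_cons, PySem.Chars.join_singleton,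
        PySem.Chars.join_cons_cons]

lemma pvJoin_ne_nil (c : List Char) (tail : List (List Char)) (h : tail ≠ []) :
    PySem.Chars.join ['.'] (c :: tail) ≠ [] := by
  cases tail with
  | nil => exact absurd rfl h
  | cons d t => rw [PySem.Chars.join_cons_cons]; simp

lemma pvSlice_drop (parts : List (List Char)) (i : Nat) :
    PySem.List.slice parts (some (i : Int)) = List.drop i parts := by
  rw [PySem.List.slice_from parts (by positivity)]
  simp

-- core loop correspondence: A's accumulator loop over the remaining prefix,
-- seeded with the join of the already-consumed tail, equals B's slice-joins
lemma pvALoop_nonempty :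
    ∀ (pre tail : List (List Char)), tail ≠ [] →
      PySem.Chars.join ['.'] tail ≠ [] →
      pvALoop pre.reverse (PySem.Chars.join ['.'] tail) =
        pvBGo (pre ++ tail) pre.length := by
  intro pre
  induction pre using List.reverseRecOn with
  | nil => intro tail _ _; rfl
  | append_singleton pre c ih =>
      intro tail ht hJ
      rw [List.reverse_append, List.reverse_singleton, List.singleton_append]
      simp only [pvALoop, if_neg hJ, pvJoin_pair c tail ht]
      rw [ih (c :: tail) (by simp) (pvJoin_ne_nil c tail ht)]
      have hassoc : pre ++ [c] ++ tail = pre ++ c :: tail := by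
        rw [List.append_assoc]; rfl
      have hn : (pre ++ [c]).length = pre.length + 1 := by simp
      rw [hassoc, hn]
      simp only [pvBGo]
      congr 1
      rw [pvSlice_drop]
      simp

-- the main correspondence when the last split part is nonempty
lemma pvMain (q : List (List Char)) (c : List Char) (hc : c ≠ []) :
    pvALoop (q ++ [c]).reverse [] = pvBGo (q ++ [c]) (q ++ [c]).length := by
  rw [List.reverse_append, List.reverse_singleton, List.singleton_append]
  simp only [pvALoop, if_true]
  have hstep : pvALoop q.reverse c = pvBGo (q ++ [c]) q.length := by
    have := pvALoop_nonempty q [c] (by simp)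
      (by rw [PySem.Chars.join_singleton]; exact hc)
    rwa [PySem.Chars.join_singleton] at this
  have hn : (q ++ [c]).length = q.length + 1 := by simp
  rw [hn]
  simp only [pvBGo]
  rw [hstep]
  congr 1
  rw [pvSlice_drop]
  simp [PySem.Chars.join_singleton]

-- ===== VERDICT (by name: the statements are the Claim_ definitions above) =====
theorem domain_chunk_reverse_spec : Claim_unchanged_domain_chunk_reverse := by
  intro domain _ hD
  unfold domain_chunk_reverse domain_chunk_reverse_alt
  simp only []
  rw [pvSplitOn_eq]
  by_cases hs : domain.toList = []
  · rw [hs]; rfl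
  · have hD' : domain.toList.getLast? ≠ some '.' := hD
    obtain ⟨q, c, hq, hc⟩ := pvSplit_last_ne domain.toList hs hD'
    rw [hq, pvMain q c hc]

theorem domain_chunk_reverse_changed : Claim_changed_domain_chunk_reverse := by
  unfold Claim_changed_domain_chunk_reverse; decide

theorem domain_chunk_reverse_tight : Claim_exact_domain_chunk_reverse := by
  intro domain _ hD
  unfold domain_chunk_reverse domain_chunk_reverse_alt
  simp only []
  rw [pvSplitOn_eq]
  have hD' : domain.toList.getLast? = some '.' := hD
  obtain ⟨q, hq, hqne⟩ := pvSplit_last_dot domain.toList hD'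
  rw [hq]
  obtain rfl | ⟨q', c, rfl⟩ := q.eq_nil_or_concat
  · exact absurd rfl hqne
  simp only [List.concat_eq_append]
  intro hEq
  -- A's second yielded value is c; B's second is c ++ ['.']
  have hA2 : (pvALoop ((q' ++ [c]) ++ [[]]).reverse []).drop 1 =
      c :: pvALoop q'.reverse c := by
    rw [List.reverse_append, List.reverse_append]
    simp only [List.reverse_singleton, List.cons_append, List.nil_append]
    simp [pvALoop]
  have hn : ((q' ++ [c]) ++ [[]]).length = q'.length + 2 := by simp
  have hB2 : (pvBGo ((q' ++ [c]) ++ [[]]) ((q' ++ [c]) ++ [[]]).length).drop 1 =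
      PySem.Chars.join ['.'] [c, []] :: pvBGo ((q' ++ [c]) ++ [[]]) q'.length := by
    rw [hn]
    simp only [pvBGo, List.drop_succ_cons, List.drop_zero]
    congr 2
    rw [pvSlice_drop]
    rw [List.append_assoc]
    simp
  have hmap := congrArg (List.drop 1) hEq
  rw [← List.map_drop, ← List.map_drop, hA2, hB2] at hmap
  have hheads : String.ofList c = String.ofList (PySem.Chars.join ['.'] [c, []]) := by
    simpa using congrArg (List.head?) hmap
  have hcc : c = PySem.Chars.join ['.'] [c, []] := by
    have := congrArg String.toList hheads
    simpa using this
  have : PySem.Chars.join ['.'] [c, []] = c ++ ['.'] := by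
    rw [PySem.Chars.join_cons_cons, PySem.Chars.join_singleton]
    simp
  rw [this] at hcc
  have := congrArg List.length hcc
  simp at this
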